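-- pv_equiv track=rewrite | github.com/honoraapp-Daniel/HonoraTextAPI | app/chapters.py | fallback_sentence_grouping
-- ===== SOURCE A (Python) =====
-- def fallback_sentence_grouping(sentences: list, offset: int = 0) -> list:
--     """
--     Fallback grouping when Gemini fails.
--     Groups sentences in batches of 3-5.
--
--     Args:
--         sentences: List of sentences
--         offset: Offset to add to indices
--
--     Returns:
--         List of paragraph groups
--     """
--     if not sentences:
--         return []
--
--     groups = []
--     current_group = []
--     target_size = 4  # Aim for 4 sentences per paragraph
--
--     for i, sent in enumerate(sentences, 1):
--         current_group.append(i + offset)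
--
--         # Start new paragraph at natural breaks or when we hit target size
--         if len(current_group) >= target_size:
--             # Check if sentence ends with strong punctuation
--             if sent.rstrip().endswith('.'):
--                 groups.append(current_group)
--                 current_group = []
--
--     # Don't forget remaining sentences
--     if current_group:
--         groups.append(current_group)
--
--     return groups
-- ===== SOURCE B (Python) =====
-- def fallback_sentence_grouping(sentences: list, offset: int = 0) -> list:
--     # Pass 1: record the 1-indexed positions where a group ends.
--     cuts = []
--     count = 0
--     for i, sent in enumerate(sentences, 1):
--         count += 1
--         if count >= 4 and sent.rstrip().endswith('.'):
--             cuts.append(i)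
--             count = 0
--     # Pass 2: turn consecutive cut boundaries into index groups.
--     groups = []
--     prev = 0
--     for cut in cuts:
--         groups.append([k + offset for k in range(prev + 1, cut + 1)])
--         prev = cut
--     trailing = [k + offset for k in range(prev + 1, len(sentences) + 1)]
--     if trailing:
--         groups.append(trailing)
--     return groups
-- ===== Notes on version B (the rewrite author's own statement) =====
-- stated objective: alternative
-- what changed: Replaces A's single loop that accumulates the current group list and appends it at each cut with a two-pass decomposition: pass 1 records only the 1-indexed cut positions using a counter, pass 2 materialises each group as a range between consecutive boundaries (plus the trailing range).
import Mathlib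
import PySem

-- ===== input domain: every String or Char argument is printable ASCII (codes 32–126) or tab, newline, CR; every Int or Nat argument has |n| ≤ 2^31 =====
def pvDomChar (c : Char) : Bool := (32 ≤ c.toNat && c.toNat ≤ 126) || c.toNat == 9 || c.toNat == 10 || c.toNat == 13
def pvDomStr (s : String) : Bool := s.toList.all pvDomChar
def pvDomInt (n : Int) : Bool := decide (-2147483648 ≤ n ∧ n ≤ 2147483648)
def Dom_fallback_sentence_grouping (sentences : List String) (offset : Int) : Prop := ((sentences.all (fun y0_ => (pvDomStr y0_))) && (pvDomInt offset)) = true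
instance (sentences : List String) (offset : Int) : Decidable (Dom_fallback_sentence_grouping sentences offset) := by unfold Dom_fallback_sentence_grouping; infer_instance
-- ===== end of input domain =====

-- B replaces A's single group-accumulating loop by a two-pass decomposition:
-- a counter pass recording cut positions, then range construction between boundaries
-- (objective: alternative decomposition; same cost).

-- ===== PORT A =====
-- sent.rstrip().endswith('.')
def pvEndsDot (s : String) : Bool := PySem.Str.endswith (PySem.Str.rstrip s) "."

-- A's loop: state (groups, current_group), 1-based enumeration index i
def pvAGo (offset : Int) : List String → Int → List (List Int) → List Int → List (List Int) × List Int
  | [], _, gs, cur => (gs, cur)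
  | s :: rest, i, gs, cur =>
    let cur' := cur ++ [i + offset]
    if 4 ≤ cur'.length then
      if pvEndsDot s then pvAGo offset rest (i + 1) (gs ++ [cur']) []
      else pvAGo offset rest (i + 1) gs cur'
    else pvAGo offset rest (i + 1) gs cur'

-- final 'if current_group: groups.append(current_group)'
def pvFin (r : List (List Int) × List Int) : List (List Int) :=
  if r.2 ≠ [] then r.1 ++ [r.2] else r.1

def fallback_sentence_grouping (sentences : List String) (offset : Int) : List (List Int) :=
  if sentences = [] then []
  else pvFin (pvAGo offset sentences 1 [] [])

-- ===== PORT B =====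
-- pass 1: record 1-indexed cut positions, resetting a counter at each cut
def pvPass1 : List String → Int → Int → List Int → List Int
  | [], _, _, cuts => cuts
  | s :: rest, i, count, cuts =>
    let count' := count + 1
    if 4 ≤ count' ∧ pvEndsDot s then pvPass1 rest (i + 1) 0 (cuts ++ [i])
    else pvPass1 rest (i + 1) count' cuts

-- [k + offset for k in range(prev + 1, cut + 1)]
def pvGrp (offset a b : Int) : List Int :=
  (PySem.List.pyRange (a + 1) (b + 1) 1).map (fun k => k + offset)

-- pass 2: walk the cuts; trailing range appended if non-empty
def pvBuild (offset n : Int) : Int → List Int → List (List Int)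
  | prev, [] =>
    let trailing := pvGrp offset prev n
    if trailing ≠ [] then [trailing] else []
  | prev, c :: cs => pvGrp offset prev c :: pvBuild offset n c cs

def fallback_sentence_grouping_alt (sentences : List String) (offset : Int) : List (List Int) :=
  pvBuild offset (sentences.length : Int) 0 (pvPass1 sentences 1 0 [])

-- ===== PRECONDITION & SPEC =====
def Spec_fallback_sentence_grouping (sentences : List String) (offset : Int) (out : List (List Int)) : Prop := out = fallback_sentence_grouping_alt sentences offset
instance (sentences : List String) (offset : Int) (out : List (List Int)) : Decidable (Spec_fallback_sentence_grouping sentences offset out) := by unfold Spec_fallback_sentence_grouping; infer_instance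

-- ===== CLAIM (what is proved, stated in full; the proofs are below) =====
def Claim_equal_fallback_sentence_grouping : Prop := ∀ (sentences : List String) (offset : Int), Dom_fallback_sentence_grouping sentences offset → Spec_fallback_sentence_grouping sentences offset (fallback_sentence_grouping sentences offset)

-- ===== LEMMAS AND PROOFS =====

lemma pvPass1_append (rest : List String) : ∀ (i count : Int) (cuts : List Int),
    pvPass1 rest i count cuts = cuts ++ pvPass1 rest i count [] := by
  induction rest with
  | nil => intro i count cuts; simp [pvPass1]
  | cons s rest ih =>
    intro i count cuts
    simp only [pvPass1]
    split
    · rw [ih (i+1) 0 (cuts ++ [i]), ih (i+1) 0 ([] ++ [i])]; simp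
    · exact ih (i+1) (count+1) cuts

lemma pvGrp_self (offset p : Int) : pvGrp offset p p = [] := by
  simp [pvGrp, PySem.List.pyRange_one_eq_nil le_rfl]

lemma pvGrp_snoc (offset p i : Int) (h : p + 1 ≤ i) :
    pvGrp offset p i = pvGrp offset p (i - 1) ++ [i + offset] := by
  have h1 : (i : Int) - 1 + 1 = i := by ring
  unfold pvGrp
  rw [PySem.List.pyRange_one_succ_right (by omega : p + 1 ≤ i)]
  simp [h1]

lemma pvGrp_length (offset p i : Int) :
    (pvGrp offset p i).length = (i - p).toNat := by
  simp [pvGrp, PySem.List.length_pyRange_one]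

lemma pvMain (offset : Int) : ∀ (rest : List String) (i p : Int) (gs : List (List Int)),
    p ≤ i - 1 →
    pvFin (pvAGo offset rest i gs (pvGrp offset p (i - 1)))
    = gs ++ pvBuild offset (i - 1 + rest.length) p (pvPass1 rest i (i - 1 - p) []) := by
  intro rest
  induction rest with
  | nil =>
    intro i p gs hp
    simp only [pvAGo, pvPass1, pvBuild, List.length_nil, Int.natCast_zero, add_zero, pvFin]
    by_cases hc : pvGrp offset p (i - 1) = [] <;> simp [hc]
  | cons s rest ih =>
    intro i p gs hp
    have hcur' : pvGrp offset p (i - 1) ++ [i + offset] = pvGrp offset p i :=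
      (pvGrp_snoc offset p i (by omega)).symm
    have hlen : (pvGrp offset p (i - 1) ++ [i + offset]).length = (i - p).toNat := by
      rw [hcur']; exact pvGrp_length offset p i
    have hb : (4 ≤ (pvGrp offset p (i - 1) ++ [i + offset]).length) ↔ (4 ≤ i - 1 - p + 1) := by
      rw [hlen]; omega
    have hn : i + 1 - 1 + (rest.length : Int) = i - 1 + ((s :: rest).length : Int) := by
      simp
    have hi : i + 1 - 1 = i := by ring
    simp only [pvAGo, pvPass1]
    by_cases h4 : 4 ≤ i - 1 - p + 1
    · by_cases hd : pvEndsDot s = true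
      · -- cut here
        rw [if_pos (hb.mpr h4), if_pos hd, if_pos ⟨h4, hd⟩, hcur']
        rw [pvPass1_append rest (i+1) 0 ([] ++ [i])]
        have h0 : pvGrp offset i (i + 1 - 1) = [] := by rw [hi]; exact pvGrp_self offset i
        have := ih (i + 1) i (gs ++ [pvGrp offset p i]) (by omega)
        rw [h0] at this
        rw [this, show i + 1 - 1 - i = (0:Int) by ring, hn]
        simp [pvBuild]
      · -- len ≥ 4 but no dot
        rw [if_pos (hb.mpr h4), if_neg hd,
            if_neg (fun h => hd h.2), hcur', show pvGrp offset p i = pvGrp offset p (i + 1 - 1) by rw [hi]]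
        have := ih (i + 1) p gs (by omega)
        rw [this, show i + 1 - 1 - p = i - 1 - p + 1 by ring, hn]
    · -- len < 4
      rw [if_neg (fun h => h4 (hb.mp h)),
          if_neg (fun h => h4 h.1), hcur', show pvGrp offset p i = pvGrp offset p (i + 1 - 1) by rw [hi]]
      have := ih (i + 1) p gs (by omega)
      rw [this, show i + 1 - 1 - p = i - 1 - p + 1 by ring, hn]

-- ===== VERDICT (by name: the statement is the Claim_ definition above) =====
theorem fallback_sentence_grouping_spec : Claim_equal_fallback_sentence_grouping := by
  intro sentences offset _
  unfold Spec_fallback_sentence_grouping fallback_sentence_grouping fallback_sentence_grouping_alt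
  by_cases hs : sentences = []
  · subst hs
    simp [pvPass1, pvBuild, pvGrp_self]
  · rw [if_neg hs]
    have := pvMain offset sentences 1 0 [] (by norm_num)
    rw [show (1:Int) - 1 = 0 by norm_num, pvGrp_self] at this
    simpa using this
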